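-- pv_equiv track=rewrite | github.com/khesly1903/String-to-DNA | dna.py | dna_to_string
-- ===== SOURCE A (Python) =====
-- def dna_to_string(dna):
--     dna_parts = dna.split()
--
--     text = ""
--     for baz in dna_parts:
--         binary_value = ""
--         for nucleotide in baz:
--             match nucleotide:
--                 case "A":
--                     binary_value += "00"
--                 case "T":
--                     binary_value += "01"
--                 case "C":
--                     binary_value += "10"
--                 case "G":
--                     binary_value += "11"
--
--         ascii_value = int(binary_value, 2)
--         char = chr(ascii_value)
--         text += char
--
--     return text
-- ===== SOURCE B (Python) =====
-- _NUC = {"A": 0, "T": 1, "C": 2, "G": 3}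
--
--
-- def _decode(word):
--     code = 0
--     for ch in word:
--         if ch in _NUC:
--             code = code * 4 + _NUC[ch]
--     return chr(code)
--
--
-- def dna_to_string(dna):
--     return "".join(map(_decode, dna.split()))
-- ===== Notes on version B (the rewrite author's own statement) =====
-- stated objective: simpler
-- what changed: Instead of building a '0'/'1' binary string per group and re-parsing it with int(.,2), B accumulates the character code directly by a base-4 Horner fold over a nucleotide-value dict and joins the decoded characters.
-- outside the precondition, e.g. on dna_to_string('1'): A raises ValueError, B returns '\x00'
import Mathlib
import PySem

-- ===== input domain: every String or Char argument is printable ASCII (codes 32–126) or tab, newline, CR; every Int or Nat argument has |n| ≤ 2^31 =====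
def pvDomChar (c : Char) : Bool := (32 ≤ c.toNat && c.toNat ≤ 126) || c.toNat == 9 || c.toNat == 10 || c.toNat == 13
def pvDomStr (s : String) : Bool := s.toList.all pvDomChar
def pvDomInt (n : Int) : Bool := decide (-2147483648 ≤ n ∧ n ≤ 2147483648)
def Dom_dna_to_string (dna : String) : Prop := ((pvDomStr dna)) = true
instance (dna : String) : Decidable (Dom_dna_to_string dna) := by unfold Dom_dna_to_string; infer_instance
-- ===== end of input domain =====

-- B replaces A's build-a-binary-string-then-int(.,2) decoding of each whitespace group by a direct
-- base-4 Horner fold over a nucleotide-value dict (simpler; same cost; return value only, no mutation).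

-- ===== PORT A =====
-- the match on nucleotide: the two binary digits appended for each recognised nucleotide, [] otherwise
def dnaBits (nucleotide : Char) : List Char :=
  match nucleotide with
  | 'A' => ['0', '0']
  | 'T' => ['0', '1']
  | 'C' => ['1', '0']
  | 'G' => ['1', '1']
  | _   => []

-- hand port of int(binary_value, 2), exact on the inputs that reach it here: binary_value consists
-- only of '0'/'1' digits (no sign/whitespace/underscore/prefix can occur), and Pre_ guarantees it is
-- nonempty (Python's int raises ValueError on an empty digit string; on [] this helper returns junk 0).
def intBase2 (cs : List Char) : Int :=
  cs.foldl (fun a c => 2 * a + (if c = '1' then 1 else 0)) 0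

-- chr(ascii_value): exact for the code points Pre_ admits (valid non-surrogate scalar values)
def dna_to_string (dna : String) : String :=
  String.mk ((PySem.Str.split₀ dna).foldl (fun text baz =>
    text ++ [Char.ofNat (intBase2 (baz.toList.foldl (fun b n => b ++ dnaBits n) [])).toNat]) [])

-- ===== PORT B =====
-- the module-level dict _NUC = {'A': 0, 'T': 1, 'C': 2, 'G': 3}
def nucDict : PySem.Dict Char Int := PySem.Dict.ofList [('A', 0), ('T', 1), ('C', 2), ('G', 3)]

-- _decode(word): base-4 Horner fold, then chr (exact for the code points Pre_ admits, as above)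
def decodeWord (word : String) : Char :=
  Char.ofNat ((word.toList.foldl (fun code ch =>
    match nucDict.get? ch with
    | some v => code * 4 + v
    | none => code) (0 : Int)).toNat)

-- ''.join(map(_decode, dna.split())) — a join of single characters is String.mk of the char list
def dna_to_string_alt (dna : String) : String :=
  String.mk ((PySem.Str.split₀ dna).map decodeWord)

-- ===== PRECONDITION & SPEC =====
-- the base-4 digit a nucleotide letter denotes (A=0, T=1, C=2, G=3), if any
def nucDigit (c : Char) : Option Nat :=
  if c = 'A' then some 0 else if c = 'T' then some 1
  else if c = 'C' then some 2 else if c = 'G' then some 3 else none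

-- the number a group's nucleotide letters denote, read as base-4 digits
def groupCode (w : String) : Nat :=
  (w.toList.filterMap nucDigit).foldl (fun a d => 4 * a + d) 0

-- Pre_ excludes exactly (a) inputs with a whitespace group containing no A/T/C/G letter, where A
-- raises ValueError from int('', 2); and (b) inputs where some group denotes a number that is not a
-- valid Lean scalar value — a surrogate (A returns a lone-surrogate Python str, which is not a value
-- of the Lean String type) or ≥ 0x110000 (A's chr raises ValueError).
def Pre_dna_to_string (dna : String) : Prop :=
  ∀ w ∈ PySem.Str.split₀ dna,
    w.toList.filterMap nucDigit ≠ [] ∧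
    (groupCode w < 55296 ∨ (57344 ≤ groupCode w ∧ groupCode w < 1114112))
instance (dna : String) : Decidable (Pre_dna_to_string dna) := by unfold Pre_dna_to_string; infer_instance

def pvWitness_dna_to_string : String := "TCCA TCTT"

def Spec_dna_to_string (dna : String) (out : String) : Prop := out = dna_to_string_alt dna
instance (dna : String) (out : String) : Decidable (Spec_dna_to_string dna out) := by unfold Spec_dna_to_string; infer_instance

def pvRaiseWitness_dna_to_string : String := "0"
def pvRaiseWitnessOut_dna_to_string : String := "\x00"

-- ===== CLAIM (what is proved, stated in full; the proofs are below) =====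
def Claim_equal_dna_to_string : Prop := ∀ (dna : String), Dom_dna_to_string dna → Pre_dna_to_string dna → Spec_dna_to_string dna (dna_to_string dna)

-- ===== LEMMAS AND PROOFS =====

-- parsing A's appended two-digit codes in base 2 is B's base-4 Horner step, uniformly in the prefix
lemma intBase2_binOf (cs : List Char) (b : List Char) :
    (cs.foldl (fun b n => b ++ dnaBits n) b).foldl
        (fun a c => 2 * a + (if c = '1' then 1 else 0)) 0
      = cs.foldl (fun code ch =>
          match nucDict.get? ch with
          | some v => code * 4 + v
          | none => code)
        (b.foldl (fun a c => 2 * a + (if c = '1' then 1 else 0)) 0) := by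
  induction cs generalizing b with
  | nil => simp
  | cons c rest ih =>
    simp only [List.foldl_cons]
    rw [ih (b ++ dnaBits c), List.foldl_append]
    congr 1
    by_cases hA : c = 'A'
    · subst hA
      have h : nucDict.get? 'A' = some 0 := by decide
      simp [dnaBits, h]; ring
    by_cases hT : c = 'T'
    · subst hT
      have h : nucDict.get? 'T' = some 1 := by decide
      simp [dnaBits, h]; ring
    by_cases hC : c = 'C'
    · subst hC
      have h : nucDict.get? 'C' = some 2 := by decide
      simp [dnaBits, h]; ring
    by_cases hG : c = 'G'
    · subst hG
      have h : nucDict.get? 'G' = some 3 := by decide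
      simp [dnaBits, h]; ring
    · have hbits : dnaBits c = [] := by
        unfold dnaBits
        split <;> first | rfl | (exfalso; simp_all)
      have hmk : nucDict = PySem.Dict.mk [('A', 0), ('T', 1), ('C', 2), ('G', 3)] := by decide
      have hget : nucDict.get? c = none := by
        rw [hmk]
        simp [PySem.Dict.get?, beq_iff_eq,
          Ne.symm hA, Ne.symm hT, Ne.symm hC, Ne.symm hG]
      simp [hbits, hget]

-- per group, A's decoded character is B's decoded character
lemma decode_agree (w : String) :
    Char.ofNat (intBase2 (w.toList.foldl (fun b n => b ++ dnaBits n) [])).toNat = decodeWord w := by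
  unfold intBase2 decodeWord
  rw [intBase2_binOf]
  rfl

-- ===== VERDICT (by name: the statement is the Claim_ definition above) =====
theorem dna_to_string_spec : Claim_equal_dna_to_string := by
  intro dna _ _
  unfold Spec_dna_to_string dna_to_string dna_to_string_alt
  rw [PySem.List.foldl_append_singleton_eq_map
        (fun baz => Char.ofNat (intBase2 (baz.toList.foldl (fun b n => b ++ dnaBits n) [])).toNat)
        (PySem.Str.split₀ dna) [], List.nil_append]
  congr 1
  exact List.map_congr_left (fun w _ => decode_agree w)
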